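-- pv_equiv track=rewrite | github.com/aaron031291/Grace- | intelligence/governance_bridge.py | _get_remediation_suggestions
-- ===== SOURCE A (Python) =====
-- def _get_remediation_suggestions(failure_modes: list[str]) -> list[str]:
--     """Get remediation suggestions for policy failures."""
--     suggestions = []
--
--     for failure_mode in failure_modes:
--         if "confidence" in failure_mode.lower():
--             suggestions.append("Consider using more confident models or ensemble methods")
--         elif "calibration" in failure_mode.lower():
--             suggestions.append("Recalibrate models or apply calibration techniques")
--         elif "fairness" in failure_mode.lower():
--             suggestions.append("Review model bias and apply fairness constraints")
--         elif "canary" in failure_mode.lower():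
--             suggestions.append("Reduce canary deployment percentage")
--         else:
--             suggestions.append("Review and adjust plan parameters")
--
--     return suggestions
-- ===== SOURCE B (Python) =====
-- # Staged overwrite passes: start with defaults, then sweep the list once per
-- # keyword from LOWEST to HIGHEST priority, overwriting matches; the last
-- # (highest-priority) write wins, which reproduces the if/elif priority.
-- _PASSES = [
--     ("canary", "Reduce canary deployment percentage"),
--     ("fairness", "Review model bias and apply fairness constraints"),
--     ("calibration", "Recalibrate models or apply calibration techniques"),
--     ("confidence", "Consider using more confident models or ensemble methods"),
-- ]
--
-- def _get_remediation_suggestions(failure_modes: list[str]) -> list[str]: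
--     """Get remediation suggestions for policy failures."""
--     lows = [fm.lower() for fm in failure_modes]
--     out = ["Review and adjust plan parameters"] * len(lows)
--     for keyword, suggestion in _PASSES:
--         for i, lm in enumerate(lows):
--             if keyword in lm:
--                 out[i] = suggestion
--     return out
-- ===== Notes on version B (the rewrite author's own statement) =====
-- stated objective: alternative
-- what changed: Replaces the per-element if/elif first-match chain with staged overwrite passes: the result starts as all defaults and one full sweep per keyword (lowest priority first) overwrites matching positions, so the highest-priority keyword wins by last write.
import Mathlib
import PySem

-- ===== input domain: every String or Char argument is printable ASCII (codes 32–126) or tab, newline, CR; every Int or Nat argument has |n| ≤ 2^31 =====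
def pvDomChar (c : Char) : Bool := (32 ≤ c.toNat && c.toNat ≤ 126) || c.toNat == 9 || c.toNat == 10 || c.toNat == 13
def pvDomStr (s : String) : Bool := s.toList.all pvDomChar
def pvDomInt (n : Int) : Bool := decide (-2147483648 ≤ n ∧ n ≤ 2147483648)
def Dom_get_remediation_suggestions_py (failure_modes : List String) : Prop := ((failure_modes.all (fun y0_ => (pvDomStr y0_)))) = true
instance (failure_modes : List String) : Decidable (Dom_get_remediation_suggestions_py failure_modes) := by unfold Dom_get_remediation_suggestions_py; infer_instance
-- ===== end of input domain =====

-- B replaces A's per-element if/elif chain by staged overwrite passes (defaults first,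
-- one sweep per keyword from lowest to highest priority, last write wins); objective: alternative.

-- ===== PORT A =====
def get_remediation_suggestions_py (failure_modes : List String) : List String :=
  failure_modes.foldl (fun suggestions failure_mode =>
    if PySem.Str.isIn "confidence" (PySem.Str.lower failure_mode) then
      suggestions ++ ["Consider using more confident models or ensemble methods"]
    else if PySem.Str.isIn "calibration" (PySem.Str.lower failure_mode) then
      suggestions ++ ["Recalibrate models or apply calibration techniques"]
    else if PySem.Str.isIn "fairness" (PySem.Str.lower failure_mode) then
      suggestions ++ ["Review model bias and apply fairness constraints"]
    else if PySem.Str.isIn "canary" (PySem.Str.lower failure_mode) then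
      suggestions ++ ["Reduce canary deployment percentage"]
    else
      suggestions ++ ["Review and adjust plan parameters"]) []

-- ===== PORT B =====
-- lowest priority first; a later pass overwrites an earlier one
def pvPasses : List (String × String) :=
  [("canary", "Reduce canary deployment percentage"),
   ("fairness", "Review model bias and apply fairness constraints"),
   ("calibration", "Recalibrate models or apply calibration techniques"),
   ("confidence", "Consider using more confident models or ensemble methods")]

-- the inner 'for i, lm in enumerate(lows): if kw in lm: out[i] = sug' as an
-- element-wise update of out against lows (exact: same positions, same test)
def pvPass (kw sug : String) (lows out : List String) : List String :=
  (lows.zip out).map (fun p => if PySem.Str.isIn kw p.1 then sug else p.2)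

def get_remediation_suggestions_py_alt (failure_modes : List String) : List String :=
  let lows := failure_modes.map (fun fm => PySem.Str.lower fm)
  let out0 := List.replicate lows.length "Review and adjust plan parameters"
  pvPasses.foldl (fun out kwsug => pvPass kwsug.1 kwsug.2 lows out) out0

-- ===== PRECONDITION & SPEC =====
def Spec_get_remediation_suggestions_py (failure_modes : List String) (out : List String) : Prop := out = get_remediation_suggestions_py_alt failure_modes
instance (failure_modes : List String) (out : List String) : Decidable (Spec_get_remediation_suggestions_py failure_modes out) := by unfold Spec_get_remediation_suggestions_py; infer_instance

-- ===== CLAIM (what is proved, stated in full; the proofs are below) =====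
def Claim_equal_get_remediation_suggestions_py : Prop := ∀ (failure_modes : List String), Dom_get_remediation_suggestions_py failure_modes → Spec_get_remediation_suggestions_py failure_modes (get_remediation_suggestions_py failure_modes)

-- ===== LEMMAS AND PROOFS =====
-- A's per-element first-match value
def pvChain (fm : String) : String :=
  if PySem.Str.isIn "confidence" (PySem.Str.lower fm) then
    "Consider using more confident models or ensemble methods"
  else if PySem.Str.isIn "calibration" (PySem.Str.lower fm) then
    "Recalibrate models or apply calibration techniques"
  else if PySem.Str.isIn "fairness" (PySem.Str.lower fm) then
    "Review model bias and apply fairness constraints"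
  else if PySem.Str.isIn "canary" (PySem.Str.lower fm) then
    "Reduce canary deployment percentage"
  else "Review and adjust plan parameters"

theorem pvPass_cons (kw sug lm o : String) (lows out : List String) :
    pvPass kw sug (lm :: lows) (o :: out)
      = (if PySem.Str.isIn kw lm then sug else o) :: pvPass kw sug lows out := by
  simp [pvPass]

theorem alt_cons (fm : String) (rest : List String) :
    get_remediation_suggestions_py_alt (fm :: rest)
      = pvChain fm :: get_remediation_suggestions_py_alt rest := by
  simp only [get_remediation_suggestions_py_alt, pvPasses, List.foldl, List.map,
    List.length_cons, List.replicate, pvPass_cons]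
  unfold pvChain
  by_cases h1 : PySem.Str.isIn "confidence" (PySem.Str.lower fm) <;>
  by_cases h2 : PySem.Str.isIn "calibration" (PySem.Str.lower fm) <;>
  by_cases h3 : PySem.Str.isIn "fairness" (PySem.Str.lower fm) <;>
  by_cases h4 : PySem.Str.isIn "canary" (PySem.Str.lower fm) <;>
  simp_all

theorem alt_eq_map (fms : List String) :
    get_remediation_suggestions_py_alt fms = fms.map pvChain := by
  induction fms with
  | nil => rfl
  | cons fm rest ih => rw [alt_cons, ih, List.map]

-- ===== VERDICT (by name: the statement is the Claim_ definition above) =====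
theorem get_remediation_suggestions_py_spec : Claim_equal_get_remediation_suggestions_py := by
  intro failure_modes _
  unfold Spec_get_remediation_suggestions_py get_remediation_suggestions_py
  rw [alt_eq_map]
  rw [show (fun (suggestions : List String) (failure_mode : String) =>
      if PySem.Str.isIn "confidence" (PySem.Str.lower failure_mode) then
        suggestions ++ ["Consider using more confident models or ensemble methods"]
      else if PySem.Str.isIn "calibration" (PySem.Str.lower failure_mode) then
        suggestions ++ ["Recalibrate models or apply calibration techniques"]
      else if PySem.Str.isIn "fairness" (PySem.Str.lower failure_mode) then
        suggestions ++ ["Review model bias and apply fairness constraints"]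
      else if PySem.Str.isIn "canary" (PySem.Str.lower failure_mode) then
        suggestions ++ ["Reduce canary deployment percentage"]
      else suggestions ++ ["Review and adjust plan parameters"])
    = (fun suggestions failure_mode => suggestions ++ [pvChain failure_mode]) from by
      funext s f; unfold pvChain; split_ifs <;> rfl]
  rw [PySem.List.foldl_append_singleton_eq_map]
  simp
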